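-- pv_equiv track=rewrite | github.com/zhangori000/leetcode-visualizer | examples/count_good_subsequences.py | countGoodSubsequences
-- ===== SOURCE A (Python) =====
-- from collections import Counter
-- import math
--
-- def countGoodSubsequences(s: str) -> int:
--     counts = Counter(s)
--     unique_letters = list(counts.keys())
--     ans = 0
--     mod = 10 ** 9 + 7
--     for bit_mask in range(1, 2 ** (len(unique_letters))):
--         current = bit_mask
--         current_letter_set = []
--         smallest_freq = float("inf")
--         for i in range(32):
--             if (current >> i) & 1:
--                 current_letter_set.append(unique_letters[i])
--                 smallest_freq = min(smallest_freq, counts[unique_letters[i]])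
--         if len(current_letter_set) == 1:
--             ans += (2 ** (counts[current_letter_set[0]]) - 1) % mod
--         else:
--             for k in range(1, int(smallest_freq) + 1):
--                 result = 1
--                 for letter in current_letter_set:
--                     if counts[letter] >= k:
--                         ways = math.comb(counts[letter], k)
--                         result *= (ways % mod)
--                 ans += (result % mod)
--     return ans % mod
-- ===== SOURCE B (Python) =====
-- from collections import Counter
-- import math
--
-- def countGoodSubsequences(s: str) -> int:
--     mod = 10 ** 9 + 7
--     freqs = list(Counter(s).values())
--     max_freq = max(freqs, default=0)
--     ans = 0
--     for k in range(1, max_freq + 1):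
--         prod = 1
--         for f in freqs:
--             prod = prod * (math.comb(f, k) + 1) % mod
--         ans = (ans + prod - 1) % mod
--     return ans
-- ===== Notes on version B (the rewrite author's own statement) =====
-- stated objective: faster
-- what changed: Replaces A's exponential enumeration of all nonempty subsets of the distinct letters (with a per-subset inner sum over frequencies) by the closed-form sum over the common frequency k of prod_letters(comb(count,k)+1) - 1, mod 1e9+7.
import Mathlib
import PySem

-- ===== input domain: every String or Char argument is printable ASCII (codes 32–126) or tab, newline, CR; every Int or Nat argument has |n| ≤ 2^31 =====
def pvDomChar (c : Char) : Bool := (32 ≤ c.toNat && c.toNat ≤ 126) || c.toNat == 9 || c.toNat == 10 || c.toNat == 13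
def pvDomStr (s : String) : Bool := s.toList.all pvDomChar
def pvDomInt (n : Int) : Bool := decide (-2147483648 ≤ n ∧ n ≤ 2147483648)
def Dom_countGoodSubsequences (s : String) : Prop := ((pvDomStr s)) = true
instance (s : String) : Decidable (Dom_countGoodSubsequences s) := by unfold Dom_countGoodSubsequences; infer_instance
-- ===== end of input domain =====

-- B replaces A's exponential subset enumeration by the closed-form sum over the common
-- frequency k of (prod over letters of (comb(count,k)+1)) - 1, mod 1e9+7 (objective: faster).

-- math.comb(n, k) for nonnegative arguments (both ports call it with nonnegative arguments only)
def pvComb (n k : Int) : Int := (n.toNat.choose k.toNat : Int)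

-- ===== PORT A =====
def countGoodSubsequences (s : String) : Int :=
  let counts := PySem.Dict.counter s.toList
  let uniqueLetters := counts.keys
  let md : Int := 10 ^ 9 + 7
  let ans := (PySem.List.pyRange 1 (2 ^ uniqueLetters.length)).foldl (fun ans bitMask =>
    -- for i in range(32): collect current_letter_set and smallest_freq
    -- smallest_freq : Option Int  (none = float("inf"); min(inf, x) = x)
    let st := (PySem.List.pyRange 0 32).foldl
      (fun (st : List Char × Option Int) i =>
        if PySem.Int.band (bitMask >>> i.toNat) 1 ≠ 0 then
          (st.1 ++ [PySem.List.pyGetD uniqueLetters i ' '],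
           some (st.2.elim (counts.getD (PySem.List.pyGetD uniqueLetters i ' ') 0)
                 (fun m => min m (counts.getD (PySem.List.pyGetD uniqueLetters i ' ') 0))))
        else st) ([], none)
    if st.1.length = 1 then
      ans + PySem.Int.mod (2 ^ (counts.getD (PySem.List.pyGetD st.1 0 ' ') 0).toNat - 1) md
    else
        -- int(smallest_freq): under Pre_ the set is nonempty here, so st.2 = some _
      (PySem.List.pyRange 1 (st.2.getD 0 + 1)).foldl (fun ans k =>
        let result := st.1.foldl (fun result letter =>
          if counts.getD letter 0 ≥ k then
            result * PySem.Int.mod (pvComb (counts.getD letter 0) k) md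
          else result) 1
        ans + PySem.Int.mod result md) ans) 0
  PySem.Int.mod ans md

-- ===== PORT B =====
def countGoodSubsequences_alt (s : String) : Int :=
  let md : Int := 10 ^ 9 + 7
  let freqs := (PySem.Dict.counter s.toList).values
  let maxFreq := PySem.List.maxD freqs (fun y => y) 0
  (PySem.List.pyRange 1 (maxFreq + 1)).foldl (fun ans k =>
    let prod := freqs.foldl (fun p f => PySem.Int.mod (p * (pvComb f k + 1)) md) 1
    PySem.Int.mod (ans + prod - 1) md) 0

-- ===== PRECONDITION & SPEC =====
-- Pre_ excludes strings with more than 32 distinct characters: there A's 32-bit loop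
-- eventually leaves the letter set empty, and converting the still-infinite smallest_freq
-- to an integer raises OverflowError.
def Pre_countGoodSubsequences (s : String) : Prop := (PySem.Set.ofList s.toList).length ≤ 32
instance (s : String) : Decidable (Pre_countGoodSubsequences s) := by unfold Pre_countGoodSubsequences; infer_instance
def pvWitness_countGoodSubsequences : String := "aabcc"
def Spec_countGoodSubsequences (s : String) (out : Int) : Prop := out = countGoodSubsequences_alt s
instance (s : String) (out : Int) : Decidable (Spec_countGoodSubsequences s out) := by unfold Spec_countGoodSubsequences; infer_instance

-- ===== CLAIM (what is proved, stated in full; the proofs are below) =====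
def Claim_equal_countGoodSubsequences : Prop := ∀ (s : String), Dom_countGoodSubsequences s → Pre_countGoodSubsequences s → Spec_countGoodSubsequences s (countGoodSubsequences s)

-- ===== LEMMAS AND PROOFS =====

-- p is fixed throughout
def pvP : Int := 10 ^ 9 + 7

-- selected bit indices of a mask, below U
def pvIdxs (U : Nat) (mask : Int) : List Nat :=
  (List.range U).filter (fun i => decide (PySem.Int.band (mask >>> i) 1 ≠ 0))

-- running minimum as A's smallest_freq maintains it (none = inf)
def pvMinStep (o : Option Int) (c : Int) : Option Int :=
  some (o.elim c (fun m => min m c))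

def pvMin : List Int → Int
  | [] => 0
  | x :: r => r.foldl min x

-- the frequencies selected by a mask
def pvSelFn (cs : List Int) (U : Nat) (mask : Int) : List Int :=
  (pvIdxs U mask).map (fun i => cs.getD i 0)

-- exact (un-reduced) per-k product over the selected frequencies
def pvProdK (sel : List Int) (k : Int) : Int := (sel.map (fun c => pvComb c k)).prod

-- exact per-mask term: sum over k = 1 .. kmax of the product
def pvTermExact (sel : List Int) (kmax : Int) : Int :=
  ((PySem.List.pyRange 1 (kmax + 1)).map (fun k => pvProdK sel k)).sum

-- ---------- generic fold/sum lemmas ----------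

theorem pvMinFold_some : ∀ (l : List Int) (x : Int),
    l.foldl pvMinStep (some x) = some (l.foldl min x) := by
  intro l
  induction l with
  | nil => intro x; rfl
  | cons y r ih => intro x; simp [List.foldl_cons, pvMinStep, ih]

theorem pvMinFold (x : Int) (r : List Int) :
    (x :: r).foldl pvMinStep none = some (pvMin (x :: r)) := by
  simp [List.foldl_cons, pvMinStep, pvMinFold_some, pvMin]

theorem pvFoldlMin_mem : ∀ (r : List Int) (x : Int), r.foldl min x ∈ x :: r := by
  intro r
  induction r with
  | nil => intro x; simp
  | cons y t ih =>
    intro x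
    rw [List.foldl_cons]
    have h := ih (min x y)
    rcases List.mem_cons.1 h with h1 | h1
    · rcases min_choice x y with h2 | h2
      · rw [h1, h2]; exact List.mem_cons_self
      · rw [h1, h2]; exact List.mem_cons.2 (Or.inr List.mem_cons_self)
    · exact List.mem_cons.2 (Or.inr (List.mem_cons.2 (Or.inr h1)))

theorem pvFoldlMin_le : ∀ (r : List Int) (x y : Int), y ∈ x :: r → r.foldl min x ≤ y := by
  intro r
  induction r with
  | nil =>
    intro x y hy
    rw [List.mem_singleton] at hy
    simp [hy]
  | cons z t ih =>
    intro x y hy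
    rw [List.foldl_cons]
    have hle : t.foldl min (min x z) ≤ min x z := ih (min x z) (min x z) List.mem_cons_self
    rcases List.mem_cons.1 hy with h1 | h1
    · subst h1; exact le_trans hle (min_le_left _ _)
    · rcases List.mem_cons.1 h1 with h2 | h2
      · subst h2; exact le_trans hle (min_le_right _ _)
      · exact ih (min x z) y (List.mem_cons.2 (Or.inr h2))

theorem pvMin_mem (l : List Int) (h : l ≠ []) : pvMin l ∈ l := by
  cases l with
  | nil => exact absurd rfl h
  | cons x r => exact pvFoldlMin_mem r x

theorem pvMin_le (l : List Int) (y : Int) (hy : y ∈ l) : pvMin l ≤ y := by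
  cases l with
  | nil => cases hy
  | cons x r => exact pvFoldlMin_le r x y hy

theorem pvListSumRange (f : Nat → Int) : ∀ (n : Nat),
    ((List.range n).map f).sum = ∑ i ∈ Finset.range n, f i := by
  intro n
  induction n with
  | zero => simp
  | succ m ih => simp [List.range_succ, Finset.sum_range_succ, ih]

theorem pvSumComm {α β : Type} (l1 : List α) (l2 : List β) (f : α → β → Int) :
    (l1.map (fun x => (l2.map (f x)).sum)).sum
    = (l2.map (fun y => (l1.map (fun x => f x y)).sum)).sum := by
  induction l1 with
  | nil => simp
  | cons x r ih =>
    simp only [List.map_cons, List.sum_cons, ih]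
    rw [← PySem.List.sum_map_add_int]

theorem pvSumModCongr {α : Type} (q : Int) : ∀ (l : List α) (f g : α → Int),
    (∀ x ∈ l, f x ≡ g x [ZMOD q]) → (l.map f).sum ≡ (l.map g).sum [ZMOD q] := by
  intro l
  induction l with
  | nil => intro f g _; rfl
  | cons x r ih =>
    intro f g h
    simp only [List.map_cons, List.sum_cons]
    exact Int.ModEq.add (h x List.mem_cons_self)
      (ih f g (fun y hy => h y (List.mem_cons.2 (Or.inr hy))))

theorem pvProdModCongr {α : Type} (q : Int) : ∀ (l : List α) (f g : α → Int),
    (∀ x ∈ l, f x ≡ g x [ZMOD q]) → (l.map f).prod ≡ (l.map g).prod [ZMOD q] := by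
  intro l
  induction l with
  | nil => intro f g _; rfl
  | cons x r ih =>
    intro f g h
    simp only [List.map_cons, List.prod_cons]
    exact Int.ModEq.mul (h x List.mem_cons_self)
      (ih f g (fun y hy => h y (List.mem_cons.2 (Or.inr hy))))

theorem pvModSelf (a q : Int) : a % q ≡ a [ZMOD q] := Int.emod_emod_of_dvd a dvd_rfl

-- ---------- bit-level lemmas ----------

theorem pvBandCast (m i : Nat) :
    (PySem.Int.band ((m : Int) >>> i) 1 ≠ 0) ↔ m.testBit i = true := by
  have hsh : ((m : Int) >>> i) = ((m >>> i : Nat) : Int) := by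
    simp [Int.shiftRight_eq_div_pow, Nat.shiftRight_eq_div_pow]
  have hband : PySem.Int.band ((m >>> i : Nat) : Int) 1 = (((m >>> i) &&& 1 : Nat) : Int) := by
    exact_mod_cast PySem.Int.band_natCast (m >>> i) 1
  rw [hsh, hband, Nat.and_one_is_mod]
  simp [Nat.testBit, Nat.one_and_eq_mod_two]
  omega

theorem pvIdxs_natCast (U : Nat) (m : Nat) :
    pvIdxs U (m : Int) = (List.range U).filter (fun i => m.testBit i) := by
  unfold pvIdxs
  apply List.filter_congr
  intro i _
  simp [pvBandCast]

-- ---------- the subset-sum identity (over Nat masks) ----------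

theorem pvMaskSum (g : Nat → Int) : ∀ (U : Nat),
    ((List.range (2 ^ U)).map
      (fun m => (((List.range U).filter (fun i => m.testBit i)).map g).prod)).sum
    = ((List.range U).map (fun i => g i + 1)).prod := by
  intro U
  induction U with
  | zero => simp
  | succ V ih =>
    have hsplit : List.range (2 ^ (V + 1))
        = List.range (2 ^ V) ++ (List.range (2 ^ V)).map (fun x => 2 ^ V + x) := by
      rw [show (2 : Nat) ^ (V + 1) = 2 ^ V + 2 ^ V by ring]
      exact List.range_add
    rw [hsplit, List.map_append, List.sum_append, List.map_map]
    have hlow : ∀ m ∈ List.range (2 ^ V),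
        (((List.range (V + 1)).filter (fun i => m.testBit i)).map g).prod
        = (((List.range V).filter (fun i => m.testBit i)).map g).prod := by
      intro m hm
      rw [List.mem_range] at hm
      rw [List.range_succ, List.filter_append]
      have h0 : List.filter (fun i => m.testBit i) [V] = [] := by
        simp [List.filter, Nat.testBit_lt_two_pow hm]
      rw [h0, List.append_nil]
    have hhigh : ∀ m ∈ List.range (2 ^ V),
        ((fun m => (((List.range (V + 1)).filter (fun i => m.testBit i)).map g).prod)
          ∘ (fun x => 2 ^ V + x)) m
        = (((List.range V).filter (fun i => m.testBit i)).map g).prod * g V := by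
      intro m hm
      rw [List.mem_range] at hm
      simp only [Function.comp]
      rw [List.range_succ, List.filter_append]
      have h1 : List.filter (fun i => (2 ^ V + m).testBit i) (List.range V)
          = List.filter (fun i => m.testBit i) (List.range V) := by
        apply List.filter_congr
        intro i hi
        rw [List.mem_range] at hi
        simp [Nat.testBit_two_pow_add_gt hi]
      have h2 : List.filter (fun i => (2 ^ V + m).testBit i) [V] = [V] := by
        simp [List.filter, Nat.testBit_two_pow_add_eq, Nat.testBit_lt_two_pow hm]
      rw [h1, h2, List.map_append, List.prod_append]
      simp
    rw [List.map_congr_left hlow, List.map_congr_left hhigh]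
    rw [List.sum_map_mul_right, ih, List.range_succ, List.map_append, List.prod_append]
    simp
    ring

-- Int-mask version, over the masks A actually enumerates (1 .. 2^U - 1)
theorem pvMaskSumInt (g : Nat → Int) (U : Nat) :
    ((PySem.List.pyRange 1 ((2 : Int) ^ U)).map (fun mask => ((pvIdxs U mask).map g).prod)).sum
    = ((List.range U).map (fun i => g i + 1)).prod - 1 := by
  have hcast : ((2 : Int) ^ U) = ((2 ^ U : Nat) : Int) := by push_cast; ring
  have h1 : (1 : Int) ≤ ((2 ^ U : Nat) : Int) := by
    have : 1 ≤ 2 ^ U := Nat.one_le_two_pow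
    exact_mod_cast this
  have hfull : ((PySem.List.pyRange 0 ((2 ^ U : Nat) : Int)).map
      (fun mask => ((pvIdxs U mask).map g).prod)).sum
      = ((List.range U).map (fun i => g i + 1)).prod := by
    rw [PySem.List.pyRange_zero_natCast, List.map_map]
    have hcong : ∀ m ∈ List.range (2 ^ U),
        ((fun mask => ((pvIdxs U mask).map g).prod) ∘ (fun k : Nat => (k : Int))) m
        = (((List.range U).filter (fun i => m.testBit i)).map g).prod := by
      intro m _
      simp only [Function.comp]
      rw [pvIdxs_natCast]
    rw [List.map_congr_left hcong, pvMaskSum]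
  have hsplit : PySem.List.pyRange 0 ((2 ^ U : Nat) : Int)
      = PySem.List.pyRange 0 1 ++ PySem.List.pyRange 1 ((2 ^ U : Nat) : Int) :=
    PySem.List.pyRange_one_append 0 1 _ (by norm_num) h1
  have hzero : PySem.List.pyRange 0 1 = [(0 : Int)] := by
    have h := PySem.List.pyRange_one_singleton (a := (0 : Int))
    simpa using h
  have hterm0 : ((pvIdxs U (0 : Int)).map g).prod = 1 := by
    have h : pvIdxs U ((0 : Nat) : Int) = [] := by
      rw [pvIdxs_natCast]
      simp [Nat.zero_testBit]
    simp only [Nat.cast_zero] at h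
    simp [h]
  rw [hsplit, hzero, List.map_append, List.sum_append] at hfull
  simp only [List.map_cons, List.map_nil, List.sum_cons, List.sum_nil, hterm0] at hfull
  rw [hcast]
  omega

-- ---------- 2^n - 1 as a binomial sum ----------

theorem pvPowSum (c : Int) (hc : 0 ≤ c) :
    ((PySem.List.pyRange 1 (c + 1)).map (fun k => pvComb c k)).sum
    = 2 ^ c.toNat - 1 := by
  obtain ⟨n, rfl⟩ := Int.eq_ofNat_of_zero_le hc
  rw [PySem.List.pyRange_one]
  have hlen : ((n : Int) + 1 - 1).toNat = n := by omega
  rw [hlen, List.map_map]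
  have hmap : ∀ k ∈ List.range n,
      ((fun k => pvComb (n : Int) k) ∘ (fun k : Nat => (1 : Int) + (k : Int))) k
      = ((n.choose (k + 1) : Nat) : Int) := by
    intro k _
    simp only [Function.comp]
    unfold pvComb
    have h1 : ((n : Int)).toNat = n := Int.toNat_natCast n
    have h2 : ((1 : Int) + (k : Int)).toNat = k + 1 := by omega
    rw [h1, h2]
  rw [List.map_congr_left hmap, pvListSumRange]
  have hnat : (∑ k ∈ Finset.range n, n.choose (k + 1)) = 2 ^ n - 1 := by
    have h2 := Finset.sum_range_succ' (fun k => n.choose k) n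
    rw [Nat.sum_range_choose] at h2
    simp at h2
    omega
  have h1le : (1 : Nat) ≤ 2 ^ n := Nat.one_le_two_pow
  calc (∑ k ∈ Finset.range n, ((n.choose (k + 1) : Nat) : Int))
      = ((∑ k ∈ Finset.range n, n.choose (k + 1) : Nat) : Int) := by push_cast; rfl
    _ = ((2 ^ n - 1 : Nat) : Int) := by rw [hnat]
    _ = 2 ^ ((n : Int)).toNat - 1 := by
        rw [Nat.cast_sub h1le, Int.toNat_natCast]
        push_cast
        ring

-- ---------- dictionary / counter facts ----------

theorem pvRange32 : PySem.List.pyRange 0 32 = (List.range 32).map (fun k : Nat => (k : Int)) := by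
  have h := PySem.List.pyRange_zero_natCast 32
  simpa using h

theorem pvValuesEqMapKeys (xs : List Char) : (PySem.Dict.counter xs).values
    = (PySem.Dict.counter xs).keys.map (fun ch => (PySem.Dict.counter xs).getD ch 0) := by
  rw [PySem.Dict.keys_counter]
  simp only [PySem.Dict.values, PySem.Dict.items_counter, List.map_map]
  apply List.map_congr_left
  intro k hk
  simp [PySem.Dict.getD_counter]

theorem pvLenValues (xs : List Char) :
    (PySem.Dict.counter xs).values.length = (PySem.Dict.counter xs).keys.length := by
  simp [PySem.Dict.values, PySem.Dict.keys]

theorem pvValuesPos (xs : List Char) : ∀ c ∈ (PySem.Dict.counter xs).values, 1 ≤ c := by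
  intro c hc
  simp only [PySem.Dict.values, PySem.Dict.items_counter, List.map_map, List.mem_map] at hc
  obtain ⟨k, hk, rfl⟩ := hc
  have hmem : k ∈ xs := (PySem.Set.mem_ofList _ _).1 hk
  have := List.count_pos_iff.2 hmem
  simp
  omega

theorem pvGetDMap (l : List Char) (φ : Char → Int) (k : Nat) (hk : k < l.length) (d : Char) :
    (l.map φ).getD k 0 = φ (l.getD k d) := by
  rw [List.getD_eq_getElem _ _ (by simpa using hk), List.getD_eq_getElem _ _ hk, List.getElem_map]

theorem pvFoldlMax_ge : ∀ (r : List Int) (x y : Int), y ∈ x :: r → y ≤ r.foldl max x := by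
  intro r
  induction r with
  | nil =>
    intro x y hy
    rw [List.mem_singleton] at hy
    simp [hy]
  | cons z t ih =>
    intro x y hy
    rw [List.foldl_cons]
    have hge : max x z ≤ t.foldl max (max x z) := ih (max x z) (max x z) List.mem_cons_self
    rcases List.mem_cons.1 hy with h1 | h1
    · subst h1; exact le_trans (le_max_left _ _) hge
    · rcases List.mem_cons.1 h1 with h2 | h2
      · subst h2; exact le_trans (le_max_right _ _) hge
      · exact ih (max x z) y (List.mem_cons.2 (Or.inr h2))

theorem pvLeMaxD (l : List Int) (c : Int) (hc : c ∈ l) :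
    c ≤ PySem.List.maxD l (fun y => y) 0 := by
  cases l with
  | nil => cases hc
  | cons x r =>
    rw [PySem.List.maxD_id_cons]
    exact pvFoldlMax_ge r x c hc

-- ---------- index-set facts ----------

theorem pvIdxs_sub (U : Nat) (mask : Int) : ∀ k ∈ pvIdxs U mask, k < U := by
  intro k hk
  unfold pvIdxs at hk
  exact List.mem_range.1 (List.mem_filter.1 hk).1

theorem pvIdxs_trunc (U V : Nat) (hUV : U ≤ V) (m : Nat) (h2 : m < 2 ^ U) :
    pvIdxs V (m : Int) = pvIdxs U (m : Int) := by
  rw [pvIdxs_natCast, pvIdxs_natCast]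
  rw [show V = U + (V - U) from (Nat.add_sub_cancel' hUV).symm, List.range_add, List.filter_append]
  have hnil : List.filter (fun i => m.testBit i) ((List.range (V - U)).map (fun x => U + x)) = [] := by
    rw [List.filter_eq_nil_iff]
    intro a ha
    rw [List.mem_map] at ha
    obtain ⟨x, _, rfl⟩ := ha
    simp [Nat.testBit_lt_two_pow
      (lt_of_lt_of_le h2 (Nat.pow_le_pow_right (by norm_num) (Nat.le_add_right U x)))]
  rw [hnil, List.append_nil]

theorem pvIdxs_ne_nil (U : Nat) (m : Nat) (h1 : 1 ≤ m) (h2 : m < 2 ^ U) :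
    pvIdxs U (m : Int) ≠ [] := by
  rw [pvIdxs_natCast]
  intro h
  have hall : ∀ i, m.testBit i = false := by
    intro i
    by_cases hi : i < U
    · have := List.filter_eq_nil_iff.1 h i (List.mem_range.2 hi)
      simpa using this
    · exact Nat.testBit_lt_two_pow
        (lt_of_lt_of_le h2 (Nat.pow_le_pow_right (by norm_num) (by omega)))
  have : m = 0 := Nat.eq_of_testBit_eq (by simp [hall, Nat.zero_testBit])
  omega

theorem pvMapRangeComb (cs : List Int) (k : Int) :
    (List.range cs.length).map (fun i => pvComb (cs.getD i 0) k + 1)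
    = cs.map (fun c => pvComb c k + 1) := by
  apply List.ext_getElem
  · simp
  · intro i h1 h2
    have hi : i < cs.length := by simpa using h1
    simp only [List.getElem_map, List.getElem_range]
    rw [List.getD_eq_getElem cs 0 hi]

-- ---------- characterizing A's inner 32-bit loop ----------

theorem pvInnerFold (uniq : List Char) (C : PySem.Dict Char Int) (mask : Int) :
    ∀ (l : List Nat) (acc : List Char × Option Int),
      l.foldl (fun (st : List Char × Option Int) (k : Nat) =>
        if PySem.Int.band (mask >>> k) 1 ≠ 0 then
          (st.1 ++ [PySem.List.pyGetD uniq (k : Int) ' '],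
           some (st.2.elim (C.getD (PySem.List.pyGetD uniq (k : Int) ' ') 0)
                 (fun m => min m (C.getD (PySem.List.pyGetD uniq (k : Int) ' ') 0))))
        else st) acc
      = (acc.1 ++ (l.filter (fun (k : Nat) => decide (PySem.Int.band (mask >>> k) 1 ≠ 0))).map
            (fun (k : Nat) => PySem.List.pyGetD uniq (k : Int) ' '),
         ((l.filter (fun (k : Nat) => decide (PySem.Int.band (mask >>> k) 1 ≠ 0))).map
            (fun (k : Nat) => C.getD (PySem.List.pyGetD uniq (k : Int) ' ') 0)).foldl pvMinStep acc.2) := by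
  intro l
  induction l with
  | nil => intro acc; simp
  | cons x r ih =>
    intro acc
    rw [List.foldl_cons]
    by_cases h : PySem.Int.band (mask >>> x) 1 ≠ 0
    · rw [if_pos h, ih]
      simp [h, pvMinStep]
    · rw [if_neg h, ih]
      simp [h]

theorem pvInnerFold32 (uniq : List Char) (C : PySem.Dict Char Int) (mask : Int) :
    (PySem.List.pyRange 0 32).foldl
      (fun (st : List Char × Option Int) i =>
        if PySem.Int.band (mask >>> i.toNat) 1 ≠ 0 then
          (st.1 ++ [PySem.List.pyGetD uniq i ' '],
           some (st.2.elim (C.getD (PySem.List.pyGetD uniq i ' ') 0)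
                 (fun m => min m (C.getD (PySem.List.pyGetD uniq i ' ') 0))))
        else st) ([], none)
    = ((pvIdxs 32 mask).map (fun (k : Nat) => PySem.List.pyGetD uniq (k : Int) ' '),
       ((pvIdxs 32 mask).map (fun (k : Nat) => C.getD (PySem.List.pyGetD uniq (k : Int) ' ') 0)).foldl
         pvMinStep none) := by
  rw [pvRange32, List.foldl_map]
  simp only [Int.toNat_natCast, Int.shiftRight_natCast_right]
  rw [pvInnerFold]
  simp [pvIdxs]

-- A's per-mask contribution, as a function (outer loop body = fun ans mask => ans + pvTredFn ...)
def pvTredFn (C : PySem.Dict Char Int) (uniq : List Char) (md : Int) (mask : Int) : Int :=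
  let st := (PySem.List.pyRange 0 32).foldl
    (fun (st : List Char × Option Int) i =>
      if PySem.Int.band (mask >>> i.toNat) 1 ≠ 0 then
        (st.1 ++ [PySem.List.pyGetD uniq i ' '],
         some (st.2.elim (C.getD (PySem.List.pyGetD uniq i ' ') 0)
               (fun m => min m (C.getD (PySem.List.pyGetD uniq i ' ') 0))))
      else st) ([], none)
  if st.1.length = 1 then
    PySem.Int.mod (2 ^ (C.getD (PySem.List.pyGetD st.1 0 ' ') 0).toNat - 1) md
  else
    ((PySem.List.pyRange 1 (st.2.getD 0 + 1)).map (fun k =>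
      PySem.Int.mod (st.1.foldl (fun result letter =>
        if C.getD letter 0 ≥ k then
          result * PySem.Int.mod (pvComb (C.getD letter 0) k) md
        else result) 1) md)).sum

theorem pvFoldA (C : PySem.Dict Char Int) (uniq : List Char) (md : Int) (l : List Int) (a : Int) :
    l.foldl (fun ans bitMask =>
      let st := (PySem.List.pyRange 0 32).foldl
        (fun (st : List Char × Option Int) i =>
          if PySem.Int.band (bitMask >>> i.toNat) 1 ≠ 0 then
            (st.1 ++ [PySem.List.pyGetD uniq i ' '],
             some (st.2.elim (C.getD (PySem.List.pyGetD uniq i ' ') 0)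
                   (fun m => min m (C.getD (PySem.List.pyGetD uniq i ' ') 0))))
          else st) ([], none)
      if st.1.length = 1 then
        ans + PySem.Int.mod (2 ^ (C.getD (PySem.List.pyGetD st.1 0 ' ') 0).toNat - 1) md
      else
        (PySem.List.pyRange 1 (st.2.getD 0 + 1)).foldl (fun ans k =>
          let result := st.1.foldl (fun result letter =>
            if C.getD letter 0 ≥ k then
              result * PySem.Int.mod (pvComb (C.getD letter 0) k) md
            else result) 1
          ans + PySem.Int.mod result md) ans) a
    = a + (l.map (pvTredFn C uniq md)).sum := by
  rw [PySem.List.foldl_congr_mem l _ (fun ans mask => ans + pvTredFn C uniq md mask) a ?_]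
  · exact PySem.List.foldl_add l (pvTredFn C uniq md) a
  · intro acc mask _
    simp only [pvTredFn, Int.shiftRight_natCast_right]
    split_ifs with h
    · rfl
    · exact PySem.List.foldl_add _ _ acc

-- ---------- the guarded inner product of A's else-branch ----------

theorem pvGuardedProd (C : PySem.Dict Char Int) (md k : Int) :
    ∀ (letters : List Char) (acc : Int), (∀ l ∈ letters, k ≤ C.getD l 0) →
      letters.foldl (fun result letter =>
        if C.getD letter 0 ≥ k then
          result * PySem.Int.mod (pvComb (C.getD letter 0) k) md
        else result) acc
      = acc * ((letters.map (fun l => C.getD l 0)).map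
          (fun c => PySem.Int.mod (pvComb c k) md)).prod := by
  intro letters
  induction letters with
  | nil => intro acc _; simp
  | cons x r ih =>
    intro acc h
    rw [List.foldl_cons, if_pos (h x List.mem_cons_self),
      ih _ (fun l hl => h l (List.mem_cons.2 (Or.inr hl)))]
    simp only [List.map_cons, List.prod_cons]
    ring

-- ---------- widening the k-range: terms beyond the smallest frequency vanish ----------

theorem pvTermExt (sel : List Int) (maxf : Int) (hne : sel ≠ [])
    (hpos : ∀ c ∈ sel, 1 ≤ c) (hle : ∀ c ∈ sel, c ≤ maxf) :
    pvTermExact sel (pvMin sel) = pvTermExact sel maxf := by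
  have hm := pvMin_mem sel hne
  have h0 : 1 ≤ pvMin sel := hpos _ hm
  have h1 : pvMin sel ≤ maxf := hle _ hm
  unfold pvTermExact
  rw [PySem.List.pyRange_one_append 1 (pvMin sel + 1) (maxf + 1) (by omega) (by omega),
    List.map_append, List.sum_append]
  have hz : ((PySem.List.pyRange (pvMin sel + 1) (maxf + 1)).map (fun k => pvProdK sel k)).sum = 0 := by
    apply List.sum_eq_zero
    intro x hx
    rw [List.mem_map] at hx
    obtain ⟨k, hk, rfl⟩ := hx
    rw [PySem.List.mem_pyRange_one] at hk
    unfold pvProdK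
    apply List.prod_eq_zero
    have hc : pvComb (pvMin sel) k = 0 := by
      unfold pvComb
      have : (pvMin sel).toNat < k.toNat := by omega
      simp [Nat.choose_eq_zero_of_lt this]
    rw [← hc]
    exact List.mem_map.2 ⟨pvMin sel, hm, rfl⟩
  rw [hz, add_zero]

-- ---------- B's two mod-folds in closed form ----------

theorem pvProdFold (k : Int) : ∀ (l : List Int) (q : Int), l ≠ [] →
    l.foldl (fun acc c => PySem.Int.mod (acc * (pvComb c k + 1)) pvP) q
    = (q * (l.map (fun c => pvComb c k + 1)).prod) % pvP := by
  intro l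
  induction l with
  | nil => intro q h; exact absurd rfl h
  | cons x r ih =>
    intro q _
    rw [List.foldl_cons]
    by_cases hr : r = []
    · subst hr
      rw [List.foldl_nil, PySem.Int.mod_eq_emod_of_pos (by norm_num [pvP])]
      simp [mul_one]
    · rw [ih _ hr, PySem.Int.mod_eq_emod_of_pos (by norm_num [pvP])]
      calc ((q * (pvComb x k + 1)) % pvP * (r.map (fun c => pvComb c k + 1)).prod) % pvP
          = (q * (pvComb x k + 1) * (r.map (fun c => pvComb c k + 1)).prod) % pvP :=
            Int.ModEq.mul_right _ (pvModSelf (q * (pvComb x k + 1)) pvP)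
        _ = (q * ((x :: r).map (fun c => pvComb c k + 1)).prod) % pvP := by
            rw [List.map_cons, List.prod_cons]
            ring_nf

theorem pvSumFoldGen (t : Int → Int) : ∀ (ks : List Int) (a : Int), ks ≠ [] →
    ks.foldl (fun ans k => PySem.Int.mod (ans + t k - 1) pvP) a
    = (a + (ks.map (fun k => t k - 1)).sum) % pvP := by
  intro ks
  induction ks with
  | nil => intro a h; exact absurd rfl h
  | cons k r ih =>
    intro a _
    rw [List.foldl_cons]
    by_cases hr : r = []
    · subst hr
      rw [List.foldl_nil, PySem.Int.mod_eq_emod_of_pos (by norm_num [pvP])]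
      simp only [List.map_cons, List.map_nil, List.sum_cons, List.sum_nil]
      congr 1
      ring
    · rw [ih _ hr, PySem.Int.mod_eq_emod_of_pos (by norm_num [pvP])]
      calc ((a + t k - 1) % pvP + (r.map (fun k => t k - 1)).sum) % pvP
          = (a + t k - 1 + (r.map (fun k => t k - 1)).sum) % pvP := by
            rw [Int.emod_add_emod]
        _ = (a + ((k :: r).map (fun k => t k - 1)).sum) % pvP := by
            rw [List.map_cons, List.sum_cons]
            congr 1
            ring

-- ---------- the pure combinatorial identity ----------

theorem pvIdentity (cs : List Int) (maxf : Int) :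
    ((PySem.List.pyRange 1 ((2 : Int) ^ cs.length)).map
      (fun mask => pvTermExact (pvSelFn cs cs.length mask) maxf)).sum
    = ((PySem.List.pyRange 1 (maxf + 1)).map
      (fun k => (cs.map (fun c => pvComb c k + 1)).prod - 1)).sum := by
  unfold pvTermExact pvSelFn
  rw [pvSumComm (PySem.List.pyRange 1 ((2 : Int) ^ cs.length)) (PySem.List.pyRange 1 (maxf + 1))
    (fun mask k => pvProdK ((pvIdxs cs.length mask).map (fun i => cs.getD i 0)) k)]
  apply congrArg List.sum
  apply List.map_congr_left
  intro k _
  simp only [pvProdK, List.map_map]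
  have h1 : ∀ mask ∈ PySem.List.pyRange 1 ((2 : Int) ^ cs.length),
      ((pvIdxs cs.length mask).map ((fun c => pvComb c k) ∘ (fun i => cs.getD i 0))).prod
      = ((pvIdxs cs.length mask).map (fun i => pvComb (cs.getD i 0) k)).prod := by
    intro mask _
    rfl
  rw [List.map_congr_left h1,
    pvMaskSumInt (fun i => pvComb (cs.getD i 0) k) cs.length, pvMapRangeComb]

-- ---------- A's per-mask term is congruent to the exact term ----------

theorem pvTredCong (xs : List Char) (mask : Int)
    (hU32 : (PySem.Dict.counter xs).keys.length ≤ 32)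
    (h1 : 1 ≤ mask) (h2 : mask < 2 ^ (PySem.Dict.counter xs).keys.length) :
    pvTredFn (PySem.Dict.counter xs) (PySem.Dict.counter xs).keys pvP mask
    ≡ pvTermExact
        (pvSelFn (PySem.Dict.counter xs).values (PySem.Dict.counter xs).keys.length mask)
        (PySem.List.maxD (PySem.Dict.counter xs).values (fun y => y) 0) [ZMOD pvP] := by
  obtain ⟨m, rfl⟩ : ∃ m : Nat, mask = (m : Int) := ⟨mask.toNat, by omega⟩
  have hm1 : 1 ≤ m := by exact_mod_cast h1
  have hm2 : m < 2 ^ (PySem.Dict.counter xs).keys.length := by exact_mod_cast h2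
  unfold pvTredFn
  rw [pvInnerFold32]
  rw [pvIdxs_trunc (PySem.Dict.counter xs).keys.length 32 hU32 m hm2]
  have hidx_lt := pvIdxs_sub (PySem.Dict.counter xs).keys.length ((m : Nat) : Int)
  have hmap1 : (pvIdxs (PySem.Dict.counter xs).keys.length ((m : Nat) : Int)).map
        (fun (k : Nat) => (PySem.Dict.counter xs).getD (PySem.List.pyGetD (PySem.Dict.counter xs).keys (k : Int) ' ') 0)
      = pvSelFn (PySem.Dict.counter xs).values (PySem.Dict.counter xs).keys.length ((m : Nat) : Int) := by
    unfold pvSelFn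
    apply List.map_congr_left
    intro k hk
    rw [PySem.List.pyGetD_natCast]
    rw [pvValuesEqMapKeys xs]
    exact (pvGetDMap (PySem.Dict.counter xs).keys
      (fun ch => (PySem.Dict.counter xs).getD ch 0) k (hidx_lt k hk) ' ').symm
  have hmap2 : ((pvIdxs (PySem.Dict.counter xs).keys.length ((m : Nat) : Int)).map
        (fun (k : Nat) => PySem.List.pyGetD (PySem.Dict.counter xs).keys (k : Int) ' ')).map
        (fun l => (PySem.Dict.counter xs).getD l 0)
      = pvSelFn (PySem.Dict.counter xs).values (PySem.Dict.counter xs).keys.length ((m : Nat) : Int) := by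
    rw [List.map_map]
    exact hmap1
  rw [hmap1]
  have hne_idxs := pvIdxs_ne_nil (PySem.Dict.counter xs).keys.length m hm1 hm2
  have hne_sel : pvSelFn (PySem.Dict.counter xs).values (PySem.Dict.counter xs).keys.length ((m : Nat) : Int) ≠ [] := by
    unfold pvSelFn
    intro h
    exact hne_idxs (List.map_eq_nil_iff.1 h)
  obtain ⟨c0, selr, hsel⟩ := List.exists_cons_of_ne_nil hne_sel
  rw [hsel, pvMinFold, ← hsel]
  simp only [Option.getD_some]
  have hsub : ∀ x ∈ pvSelFn (PySem.Dict.counter xs).values (PySem.Dict.counter xs).keys.length ((m : Nat) : Int),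
      x ∈ (PySem.Dict.counter xs).values := by
    intro x hx
    obtain ⟨i, hi, rfl⟩ := List.mem_map.1 hx
    have hilen : i < (PySem.Dict.counter xs).values.length := by
      rw [pvLenValues]; exact hidx_lt i hi
    rw [List.getD_eq_getElem _ _ hilen]
    exact List.getElem_mem hilen
  have hpos : ∀ x ∈ pvSelFn (PySem.Dict.counter xs).values (PySem.Dict.counter xs).keys.length ((m : Nat) : Int), 1 ≤ x :=
    fun x hx => pvValuesPos xs x (hsub x hx)
  have hle : ∀ x ∈ pvSelFn (PySem.Dict.counter xs).values (PySem.Dict.counter xs).keys.length ((m : Nat) : Int),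
      x ≤ PySem.List.maxD (PySem.Dict.counter xs).values (fun y => y) 0 :=
    fun x hx => pvLeMaxD _ x (hsub x hx)
  have hext := pvTermExt _ _ hne_sel hpos hle
  rw [← hext]
  by_cases hlen : ((pvIdxs (PySem.Dict.counter xs).keys.length ((m : Nat) : Int)).map
      (fun (k : Nat) => PySem.List.pyGetD (PySem.Dict.counter xs).keys (k : Int) ' ')).length = 1
  · rw [if_pos hlen]
    obtain ⟨a, ha⟩ := List.length_eq_one_iff.1 hlen
    have hsel1 : pvSelFn (PySem.Dict.counter xs).values (PySem.Dict.counter xs).keys.length ((m : Nat) : Int)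
        = [(PySem.Dict.counter xs).getD a 0] := by
      rw [← hmap2, ha]
      simp
    rw [ha]
    have hget : PySem.List.pyGetD [a] (0 : Int) ' ' = a := by
      rw [show ((0 : Int)) = ((0 : Nat) : Int) from rfl, PySem.List.pyGetD_natCast]
      rfl
    rw [hget, hsel1]
    have hmem : (PySem.Dict.counter xs).getD a 0
        ∈ pvSelFn (PySem.Dict.counter xs).values (PySem.Dict.counter xs).keys.length ((m : Nat) : Int) := by
      rw [hsel1]; exact List.mem_cons_self
    have hc := hpos _ hmem
    have hmin1 : pvMin [(PySem.Dict.counter xs).getD a 0] = (PySem.Dict.counter xs).getD a 0 := rfl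
    rw [hmin1]
    have hval : pvTermExact [(PySem.Dict.counter xs).getD a 0] ((PySem.Dict.counter xs).getD a 0)
        = 2 ^ ((PySem.Dict.counter xs).getD a 0).toNat - 1 := by
      unfold pvTermExact
      have hpk : ∀ k' ∈ PySem.List.pyRange 1 ((PySem.Dict.counter xs).getD a 0 + 1),
          pvProdK [(PySem.Dict.counter xs).getD a 0] k' = pvComb ((PySem.Dict.counter xs).getD a 0) k' := by
        intro k' _
        simp [pvProdK]
      rw [List.map_congr_left hpk]
      exact pvPowSum _ (by omega)
    rw [hval]
    rw [PySem.Int.mod_eq_emod_of_pos (by norm_num [pvP])]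
    exact pvModSelf _ _
  · rw [if_neg hlen]
    unfold pvTermExact
    apply pvSumModCongr
    intro k hk
    rw [PySem.List.mem_pyRange_one] at hk
    have hguard : ∀ l ∈ (pvIdxs (PySem.Dict.counter xs).keys.length ((m : Nat) : Int)).map
        (fun (k : Nat) => PySem.List.pyGetD (PySem.Dict.counter xs).keys (k : Int) ' '),
        k ≤ (PySem.Dict.counter xs).getD l 0 := by
      intro l hl
      have hmem : (PySem.Dict.counter xs).getD l 0
          ∈ pvSelFn (PySem.Dict.counter xs).values (PySem.Dict.counter xs).keys.length ((m : Nat) : Int) := by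
        rw [← hmap2]
        exact List.mem_map.2 ⟨l, hl, rfl⟩
      have := pvMin_le _ _ hmem
      omega
    rw [pvGuardedProd (PySem.Dict.counter xs) pvP k _ 1 hguard, one_mul, hmap2]
    rw [PySem.Int.mod_eq_emod_of_pos (by norm_num [pvP])]
    refine (pvModSelf _ _).trans ?_
    unfold pvProdK
    apply pvProdModCongr
    intro c _
    rw [PySem.Int.mod_eq_emod_of_pos (by norm_num [pvP])]
    exact pvModSelf _ _

-- ---------- main equivalence ----------

theorem pvMain (s : String) (hPre : (PySem.Set.ofList s.toList).length ≤ 32) :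
    countGoodSubsequences s = countGoodSubsequences_alt s := by
  have hU32 : (PySem.Dict.counter s.toList).keys.length ≤ 32 := by
    rw [PySem.Dict.keys_counter]; exact hPre
  have hlen := pvLenValues s.toList
  simp only [countGoodSubsequences, countGoodSubsequences_alt]
  rw [pvFoldA, zero_add]
  rw [show ((10 : Int) ^ 9 + 7) = pvP from rfl]
  rw [PySem.Int.mod_eq_emod_of_pos (show (0 : Int) < pvP by norm_num [pvP])]
  by_cases hcs : (PySem.Dict.counter s.toList).values = []
  · have hk0 : (PySem.Dict.counter s.toList).keys.length = 0 := by
      rw [← hlen, hcs]; rfl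
    rw [hk0, hcs, PySem.List.maxD_nil, pow_zero]
    rw [PySem.List.pyRange_one_eq_nil (le_refl (1 : Int)),
      show ((0 : Int) + 1) = 1 by ring, PySem.List.pyRange_one_eq_nil (le_refl (1 : Int))]
    simp
  · have hmaxmem := PySem.List.maxD_mem (PySem.Dict.counter s.toList).values (fun y => y) 0 hcs
    have hmax1 : 1 ≤ PySem.List.maxD (PySem.Dict.counter s.toList).values (fun y => y) 0 :=
      pvValuesPos s.toList _ hmaxmem
    have hKne : PySem.List.pyRange 1
        (PySem.List.maxD (PySem.Dict.counter s.toList).values (fun y => y) 0 + 1) ≠ [] := by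
      rw [PySem.List.pyRange_one_cons (by omega)]
      simp
    rw [pvSumFoldGen (fun k => (PySem.Dict.counter s.toList).values.foldl
        (fun acc c => PySem.Int.mod (acc * (pvComb c k + 1)) pvP) 1) _ 0 hKne, zero_add]
    have hA : ((PySem.List.pyRange 1 ((2 : Int) ^ (PySem.Dict.counter s.toList).keys.length)).map
          (pvTredFn (PySem.Dict.counter s.toList) (PySem.Dict.counter s.toList).keys pvP)).sum
        ≡ ((PySem.List.pyRange 1 ((2 : Int) ^ (PySem.Dict.counter s.toList).keys.length)).map
          (fun mask => pvTermExact
            (pvSelFn (PySem.Dict.counter s.toList).values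
              (PySem.Dict.counter s.toList).keys.length mask)
            (PySem.List.maxD (PySem.Dict.counter s.toList).values (fun y => y) 0))).sum
          [ZMOD pvP] := by
      apply pvSumModCongr
      intro mask hm
      rw [PySem.List.mem_pyRange_one] at hm
      exact pvTredCong s.toList mask hU32 hm.1 hm.2
    have hAid : ((PySem.List.pyRange 1 ((2 : Int) ^ (PySem.Dict.counter s.toList).keys.length)).map
          (fun mask => pvTermExact
            (pvSelFn (PySem.Dict.counter s.toList).values
              (PySem.Dict.counter s.toList).keys.length mask)
            (PySem.List.maxD (PySem.Dict.counter s.toList).values (fun y => y) 0))).sum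
        = ((PySem.List.pyRange 1
            (PySem.List.maxD (PySem.Dict.counter s.toList).values (fun y => y) 0 + 1)).map
          (fun k => ((PySem.Dict.counter s.toList).values.map
            (fun c => pvComb c k + 1)).prod - 1)).sum := by
      have hid := pvIdentity (PySem.Dict.counter s.toList).values
        (PySem.List.maxD (PySem.Dict.counter s.toList).values (fun y => y) 0)
      rw [hlen] at hid
      exact hid
    have hB : ((PySem.List.pyRange 1
          (PySem.List.maxD (PySem.Dict.counter s.toList).values (fun y => y) 0 + 1)).map
        (fun k => (PySem.Dict.counter s.toList).values.foldl
          (fun acc c => PySem.Int.mod (acc * (pvComb c k + 1)) pvP) 1 - 1)).sum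
        ≡ ((PySem.List.pyRange 1
            (PySem.List.maxD (PySem.Dict.counter s.toList).values (fun y => y) 0 + 1)).map
          (fun k => ((PySem.Dict.counter s.toList).values.map
            (fun c => pvComb c k + 1)).prod - 1)).sum [ZMOD pvP] := by
      apply pvSumModCongr
      intro k _
      rw [pvProdFold k _ 1 hcs, one_mul]
      exact Int.ModEq.sub (pvModSelf _ _) (Int.ModEq.refl 1)
    exact ((hAid ▸ hA).trans hB.symm)

-- ===== VERDICT (by name: the statement is the Claim_ definition above) =====
theorem countGoodSubsequences_spec : Claim_equal_countGoodSubsequences := by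
  intro s _ hPre
  unfold Spec_countGoodSubsequences
  exact pvMain s hPre
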